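-- pv_equiv track=rewrite | github.com/Wbrown633/ChessGame | chessGame.py | findDiagPath
-- ===== SOURCE A (Python) =====
-- def findDiagPath(start, end):
--     listofCoords = []
--     if start[1] < end[1]:
--         # up and to the left
--         if start[0] > end[0]:
--             while start[0] > end[0] + 1:
--                 start = (start[0] - 1, start[1] + 1)
--                 listofCoords.append(start)
--
--         # up and to the right
--         else:
--             while start[0] < end[0] - 1:
--                 start = (start[0] + 1, start[1] + 1)
--                 listofCoords.append(start)
--
--     if start[1] > end[1]:
--
--         # down and to the left
--         if start[0] > end[0]:
--             while start[0] > end[0] + 1: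
--                 start = (start[0] - 1, start[1] - 1)
--                 listofCoords.append(start)
--         # down and to the right
--         else:
--             while start[0] < end[0] - 1:
--                 start = (start[0] + 1, start[1] - 1)
--                 listofCoords.append(start)
--
--     return listofCoords
-- ===== SOURCE B (Python) =====
-- def findDiagPath(start, end):
--     # Walk the diagonal BACKWARDS: start from the square just before `end` and
--     # step toward `start`, collecting points in reverse order, then reverse once.
--     (sx, sy), (ex, ey) = start, end
--     if sy == ey:
--         return []
--     dx = -1 if sx > ex else 1
--     dy = 1 if sy < ey else -1
--     out = []
--     x = ex - dx
--     while (x - sx) * dx > 0: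
--         out.append((x, sy + (x - sx) * dx * dy))
--         x -= dx
--     out.reverse()
--     return out
-- ===== Notes on version B (the rewrite author's own statement) =====
-- stated objective: alternative
-- what changed: Instead of A's four sign-specific forward while-loops mutating start, B computes the step direction arithmetically and walks the diagonal backwards from the square just before end toward start with one product-sign loop guard, collecting the points in reverse order and reversing the list once at the end.
import Mathlib
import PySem

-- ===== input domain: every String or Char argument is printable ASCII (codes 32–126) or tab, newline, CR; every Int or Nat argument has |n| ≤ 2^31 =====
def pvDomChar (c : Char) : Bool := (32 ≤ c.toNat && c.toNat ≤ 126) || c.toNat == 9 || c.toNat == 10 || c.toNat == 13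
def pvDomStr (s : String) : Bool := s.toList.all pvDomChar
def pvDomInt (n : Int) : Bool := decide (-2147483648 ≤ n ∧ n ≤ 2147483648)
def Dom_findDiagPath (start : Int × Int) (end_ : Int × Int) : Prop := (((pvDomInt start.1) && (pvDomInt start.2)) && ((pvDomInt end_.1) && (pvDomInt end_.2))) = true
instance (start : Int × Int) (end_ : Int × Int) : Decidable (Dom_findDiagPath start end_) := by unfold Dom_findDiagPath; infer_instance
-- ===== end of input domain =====

-- B walks the diagonal backwards from the square just before end toward start with one
-- product-sign loop guard, then reverses the collected list once (objective: alternative).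

-- ===== PORT A =====
-- the four while-loops of A, each returning (final start, accumulated list)
def whileUL (s0 s1 e0 : Int) (acc : List (Int × Int)) : Int × Int × List (Int × Int) :=
  if s0 > e0 + 1 then whileUL (s0 - 1) (s1 + 1) e0 (acc ++ [(s0 - 1, s1 + 1)]) else (s0, s1, acc)
  termination_by (s0 - e0).toNat
  decreasing_by omega

def whileUR (s0 s1 e0 : Int) (acc : List (Int × Int)) : Int × Int × List (Int × Int) :=
  if s0 < e0 - 1 then whileUR (s0 + 1) (s1 + 1) e0 (acc ++ [(s0 + 1, s1 + 1)]) else (s0, s1, acc)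
  termination_by (e0 - s0).toNat
  decreasing_by omega

def whileDL (s0 s1 e0 : Int) (acc : List (Int × Int)) : Int × Int × List (Int × Int) :=
  if s0 > e0 + 1 then whileDL (s0 - 1) (s1 - 1) e0 (acc ++ [(s0 - 1, s1 - 1)]) else (s0, s1, acc)
  termination_by (s0 - e0).toNat
  decreasing_by omega

def whileDR (s0 s1 e0 : Int) (acc : List (Int × Int)) : Int × Int × List (Int × Int) :=
  if s0 < e0 - 1 then whileDR (s0 + 1) (s1 - 1) e0 (acc ++ [(s0 + 1, s1 - 1)]) else (s0, s1, acc)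
  termination_by (e0 - s0).toNat
  decreasing_by omega

def findDiagPath (start : Int × Int) (end_ : Int × Int) : List (Int × Int) :=
  let r1 :=
    if start.2 < end_.2 then
      if start.1 > end_.1 then whileUL start.1 start.2 end_.1 []
      else whileUR start.1 start.2 end_.1 []
    else (start.1, start.2, ([] : List (Int × Int)))
  if r1.2.1 > end_.2 then
    if r1.1 > end_.1 then (whileDL r1.1 r1.2.1 end_.1 r1.2.2).2.2
    else (whileDR r1.1 r1.2.1 end_.1 r1.2.2).2.2
  else r1.2.2

-- ===== PORT B =====
-- B's backward while-loop: x runs from the square before end toward start, appending.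
-- fuel is a structural totality guard covering exactly the loop's iteration count.
def walkLoop (fuel : Nat) (sx sy x dx dy : Int) (acc : List (Int × Int)) : List (Int × Int) :=
  match fuel with
  | 0 => acc
  | fuel + 1 =>
    if (x - sx) * dx > 0 then
      walkLoop fuel sx sy (x - dx) dx dy (acc ++ [(x, sy + (x - sx) * dx * dy)])
    else acc

def findDiagPath_alt (start : Int × Int) (end_ : Int × Int) : List (Int × Int) :=
  if start.2 == end_.2 then []
  else
    let dx : Int := if start.1 > end_.1 then -1 else 1
    let dy : Int := if start.2 < end_.2 then 1 else -1
    (walkLoop (((end_.1 - dx) - start.1) * dx).toNat start.1 start.2 (end_.1 - dx) dx dy []).reverse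

-- ===== PRECONDITION & SPEC =====
def Spec_findDiagPath (start : Int × Int) (end_ : Int × Int) (out : List (Int × Int)) : Prop := out = findDiagPath_alt start end_
instance (start : Int × Int) (end_ : Int × Int) (out : List (Int × Int)) : Decidable (Spec_findDiagPath start end_ out) := by unfold Spec_findDiagPath; infer_instance

-- ===== CLAIM (what is proved, stated in full; the proofs are below) =====
def Claim_equal_findDiagPath : Prop := ∀ (start : Int × Int) (end_ : Int × Int), Dom_findDiagPath start end_ → Spec_findDiagPath start end_ (findDiagPath start end_)

-- ===== LEMMAS AND PROOFS =====

theorem whileUL_eq (s0 s1 e0 : Int) (acc : List (Int × Int)) :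
    whileUL s0 s1 e0 acc =
      (s0 - ((s0 - e0 - 1).toNat : Int), s1 + ((s0 - e0 - 1).toNat : Int),
       acc ++ (List.range (s0 - e0 - 1).toNat).map (fun k : Nat => ((s0 - ((k : Int) + 1), s1 + ((k : Int) + 1)) : Int × Int))) := by
  fun_induction whileUL with
  | case1 s0 s1 acc h ih =>
    have hm : (s0 - e0 - 1).toNat = (s0 - 1 - e0 - 1).toNat + 1 := by omega
    rw [ih, hm, List.range_succ_eq_map]
    simp only [List.map_cons, List.map_map, List.append_assoc, List.singleton_append, Prod.mk.injEq]
    refine ⟨by push_cast; ring, by push_cast; ring, ?_⟩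
    congr 1
    congr 1
    refine List.map_congr_left ?_
    intro k _
    simp only [Function.comp, Prod.mk.injEq]
    constructor <;> (push_cast; ring)
  | case2 s0 s1 acc h =>
    have h0 : (s0 - e0 - 1).toNat = 0 := by omega
    rw [h0]
    simp

theorem whileUR_eq (s0 s1 e0 : Int) (acc : List (Int × Int)) :
    whileUR s0 s1 e0 acc =
      (s0 + ((e0 - s0 - 1).toNat : Int), s1 + ((e0 - s0 - 1).toNat : Int),
       acc ++ (List.range (e0 - s0 - 1).toNat).map (fun k : Nat => ((s0 + ((k : Int) + 1), s1 + ((k : Int) + 1)) : Int × Int))) := by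
  fun_induction whileUR with
  | case1 s0 s1 acc h ih =>
    have hm : (e0 - s0 - 1).toNat = (e0 - (s0 + 1) - 1).toNat + 1 := by omega
    rw [ih, hm, List.range_succ_eq_map]
    simp only [List.map_cons, List.map_map, List.append_assoc, List.singleton_append, Prod.mk.injEq]
    refine ⟨by push_cast; ring, by push_cast; ring, ?_⟩
    congr 1
    congr 1
    refine List.map_congr_left ?_
    intro k _
    simp only [Function.comp, Prod.mk.injEq]
    constructor <;> (push_cast; ring)
  | case2 s0 s1 acc h =>
    have h0 : (e0 - s0 - 1).toNat = 0 := by omega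
    rw [h0]
    simp

theorem whileDL_eq (s0 s1 e0 : Int) (acc : List (Int × Int)) :
    whileDL s0 s1 e0 acc =
      (s0 - ((s0 - e0 - 1).toNat : Int), s1 - ((s0 - e0 - 1).toNat : Int),
       acc ++ (List.range (s0 - e0 - 1).toNat).map (fun k : Nat => ((s0 - ((k : Int) + 1), s1 - ((k : Int) + 1)) : Int × Int))) := by
  fun_induction whileDL with
  | case1 s0 s1 acc h ih =>
    have hm : (s0 - e0 - 1).toNat = (s0 - 1 - e0 - 1).toNat + 1 := by omega
    rw [ih, hm, List.range_succ_eq_map]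
    simp only [List.map_cons, List.map_map, List.append_assoc, List.singleton_append, Prod.mk.injEq]
    refine ⟨by push_cast; ring, by push_cast; ring, ?_⟩
    congr 1
    congr 1
    refine List.map_congr_left ?_
    intro k _
    simp only [Function.comp, Prod.mk.injEq]
    constructor <;> (push_cast; ring)
  | case2 s0 s1 acc h =>
    have h0 : (s0 - e0 - 1).toNat = 0 := by omega
    rw [h0]
    simp

theorem whileDR_eq (s0 s1 e0 : Int) (acc : List (Int × Int)) :
    whileDR s0 s1 e0 acc =
      (s0 + ((e0 - s0 - 1).toNat : Int), s1 - ((e0 - s0 - 1).toNat : Int),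
       acc ++ (List.range (e0 - s0 - 1).toNat).map (fun k : Nat => ((s0 + ((k : Int) + 1), s1 - ((k : Int) + 1)) : Int × Int))) := by
  fun_induction whileDR with
  | case1 s0 s1 acc h ih =>
    have hm : (e0 - s0 - 1).toNat = (e0 - (s0 + 1) - 1).toNat + 1 := by omega
    rw [ih, hm, List.range_succ_eq_map]
    simp only [List.map_cons, List.map_map, List.append_assoc, List.singleton_append, Prod.mk.injEq]
    refine ⟨by push_cast; ring, by push_cast; ring, ?_⟩
    congr 1
    congr 1
    refine List.map_congr_left ?_
    intro k _
    simp only [Function.comp, Prod.mk.injEq]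
    constructor <;> (push_cast; ring)
  | case2 s0 s1 acc h =>
    have h0 : (e0 - s0 - 1).toNat = 0 := by omega
    rw [h0]
    simp

-- closed form of B's backward loop for dx = 1
theorem walkLoop_pos (sx sy dy : Int) : ∀ (n : Nat) (x : Int) (acc : List (Int × Int)),
    (x - sx).toNat = n →
    walkLoop n sx sy x 1 dy acc =
      acc ++ ((List.range n).map (fun k : Nat => ((sx + ((k : Int) + 1), sy + ((k : Int) + 1) * dy) : Int × Int))).reverse := by
  intro n
  induction n with
  | zero =>
    intro x acc hx
    simp [walkLoop]
  | succ n ih =>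
    intro x acc hx
    rw [walkLoop]
    rw [if_pos (by omega)]
    rw [ih (x - 1) _ (by omega)]
    rw [List.range_succ, List.map_append, List.reverse_append]
    simp only [List.map_cons, List.map_nil, List.reverse_cons, List.reverse_nil,
      List.nil_append, List.append_assoc, List.singleton_append]
    congr 2
    have hx' : x = sx + ((n : Int) + 1) := by omega
    rw [hx']
    exact Prod.mk.injEq .. ▸ ⟨rfl, by ring⟩

-- closed form of B's backward loop for dx = -1
theorem walkLoop_neg (sx sy dy : Int) : ∀ (n : Nat) (x : Int) (acc : List (Int × Int)),
    (sx - x).toNat = n →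
    walkLoop n sx sy x (-1) dy acc =
      acc ++ ((List.range n).map (fun k : Nat => ((sx - ((k : Int) + 1), sy + ((k : Int) + 1) * dy) : Int × Int))).reverse := by
  intro n
  induction n with
  | zero =>
    intro x acc hx
    simp [walkLoop]
  | succ n ih =>
    intro x acc hx
    rw [walkLoop]
    rw [if_pos (by omega)]
    rw [ih (x - (-1)) _ (by omega)]
    rw [List.range_succ, List.map_append, List.reverse_append]
    simp only [List.map_cons, List.map_nil, List.reverse_cons, List.reverse_nil,
      List.nil_append, List.append_assoc, List.singleton_append]
    congr 2
    have hx' : x = sx - ((n : Int) + 1) := by omega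
    rw [hx']
    exact Prod.mk.injEq .. ▸ ⟨rfl, by ring⟩

-- ===== VERDICT (by name: the statement is the Claim_ definition above) =====
theorem findDiagPath_spec : Claim_equal_findDiagPath := by
  intro start end_ _
  obtain ⟨s0, s1⟩ := start
  obtain ⟨e0, e1⟩ := end_
  unfold Spec_findDiagPath findDiagPath findDiagPath_alt
  simp only
  rcases lt_trichotomy s1 e1 with h1 | h1 | h1
  · -- s1 < e1
    rw [if_pos h1]
    have hne : (s1 == e1) = false := by simp; omega
    rw [hne]
    simp only [Bool.false_eq_true, if_false, if_pos h1]
    by_cases h0 : s0 > e0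
    · rw [if_pos h0, whileUL_eq]
      set m : Nat := (s0 - e0 - 1).toNat with hm
      simp only [List.nil_append]
      rw [if_pos h0]
      rw [show ((e0 - -1 - s0) * -1).toNat = m from by omega,
         walkLoop_neg s0 s1 1 m (e0 - (-1)) [] (by omega)]
      rw [List.nil_append, List.reverse_reverse]
      by_cases h2 : s1 + (m : Int) > e1
      · rw [if_pos h2]
        have hs0 : s0 - (m : Int) = e0 + 1 := by omega
        rw [hs0, if_pos (by omega), whileDL_eq]
        have h3 : (e0 + 1 - e0 - 1).toNat = 0 := by omega
        rw [h3]
        simp only [List.range_zero, List.map_nil, List.append_nil]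
        refine List.map_congr_left ?_
        intro k _
        simp only [Prod.mk.injEq]
        exact ⟨trivial, by ring⟩
      · rw [if_neg h2]
        refine List.map_congr_left ?_
        intro k _
        simp only [Prod.mk.injEq]
        exact ⟨trivial, by ring⟩
    · rw [if_neg h0, whileUR_eq]
      set m : Nat := (e0 - s0 - 1).toNat with hm
      simp only [List.nil_append]
      rw [if_neg h0]
      rw [show ((e0 - 1 - s0) * 1).toNat = m from by omega,
         walkLoop_pos s0 s1 1 m (e0 - 1) [] (by omega)]
      rw [List.nil_append, List.reverse_reverse]
      by_cases h2 : s1 + (m : Int) > e1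
      · rw [if_pos h2]
        have hs0 : s0 + (m : Int) = e0 - 1 := by omega
        rw [hs0, if_neg (by omega), whileDR_eq]
        have h3 : (e0 - (e0 - 1) - 1).toNat = 0 := by omega
        rw [h3]
        simp only [List.range_zero, List.map_nil, List.append_nil]
        refine List.map_congr_left ?_
        intro k _
        simp only [Prod.mk.injEq]
        exact ⟨trivial, by ring⟩
      · rw [if_neg h2]
        refine List.map_congr_left ?_
        intro k _
        simp only [Prod.mk.injEq]
        exact ⟨trivial, by ring⟩
  · -- s1 = e1
    subst h1
    rw [if_neg (lt_irrefl _)]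
    simp only [if_neg (lt_irrefl s1 : ¬ s1 > s1)]
    have hb : (s1 == s1) = true := by simp
    rw [hb, if_pos rfl]
  · -- s1 > e1
    have hlt : ¬ s1 < e1 := by omega
    rw [if_neg hlt]
    simp only
    rw [if_pos h1]
    have hne : (s1 == e1) = false := by simp; omega
    rw [hne]
    simp only [Bool.false_eq_true, if_false, if_neg (by omega : ¬ s1 < e1)]
    by_cases h0 : s0 > e0
    · rw [if_pos h0, whileDL_eq]
      simp only [List.nil_append]
      rw [if_pos h0]
      set m : Nat := (s0 - e0 - 1).toNat with hm
      rw [show ((e0 - -1 - s0) * -1).toNat = m from by omega,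
         walkLoop_neg s0 s1 (-1) m (e0 - (-1)) [] (by omega)]
      rw [List.nil_append, List.reverse_reverse]
      refine List.map_congr_left ?_
      intro k _
      simp only [Prod.mk.injEq]
      exact ⟨trivial, by ring⟩
    · rw [if_neg h0, whileDR_eq]
      simp only [List.nil_append]
      rw [if_neg h0]
      set m : Nat := (e0 - s0 - 1).toNat with hm
      rw [show ((e0 - 1 - s0) * 1).toNat = m from by omega,
         walkLoop_pos s0 s1 (-1) m (e0 - 1) [] (by omega)]
      rw [List.nil_append, List.reverse_reverse]
      refine List.map_congr_left ?_
      intro k _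
      simp only [Prod.mk.injEq]
      exact ⟨trivial, by ring⟩
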